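-- pv_equiv track=rewrite | github.com/kaialami/PythonPrograms | keynumberencoding.py | keynumberDecode
-- ===== SOURCE A (Python) =====
-- def keynumberDecode(message, key):
--     message2 = message.upper()
--     message2 = message2.replace(" ", "")
--
--     keystring = str(key)
--     size = len(message2)
--     keysize = len(keystring)
--     offset = 0
--     increment = 0
--     assignment = {}
--     specials = ["#", "?", "$", "!", "&", "%"]
--
--     while increment < size:
--         if message2[increment] in specials:
--             assignment[increment] = 0
--         else:
--             assignment[increment] = keystring[offset]
--             offset += 1
--             if offset > keysize - 1:
--                 offset = 0
--         increment += 1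
--
--     ordA = ord("A")
--     decoded = ""
--     for letterIndex in range(size):
--         letter = message2[letterIndex]
--         if letter not in specials:
--             letterOrd = ord(letter)
--             newOrd = letterOrd - int(assignment[letterIndex])
--             if newOrd < ordA:
--                 newOrd += 26
--         else:
--             newOrd = 32
--         decoded += chr(newOrd)
--
--     return decoded.capitalize()
-- ===== SOURCE B (Python) =====
-- def keynumberDecode(message, key):
--     # B: one fused pass over the cleaned message with an inline cycling offset
--     # (no assignment dict, no second indexing loop); same return value as A.
--     specials = ["#", "?", "$", "!", "&", "%"]
--     keystring = str(key)
--     keysize = len(keystring)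
--     ordA = ord("A")
--     out = []
--     off = 0
--     for ch in message.upper().replace(" ", ""):
--         if ch in specials:
--             out.append(chr(32))
--         else:
--             v = ord(ch) - int(keystring[off])
--             if v < ordA:
--                 v += 26
--             out.append(chr(v))
--             off = (off + 1) % keysize
--     return "".join(out).capitalize()
-- ===== Notes on version B (the rewrite author's own statement) =====
-- stated objective: simpler
-- what changed: Replaces A's two loops (one building an index->keydigit dict, one re-indexing the message to consume it) and the dict itself with a single fused pass that decodes each character as it is met, carrying the cycling key offset inline (wrap by modulo); also list-append/join instead of string +=.
import Mathlib
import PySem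

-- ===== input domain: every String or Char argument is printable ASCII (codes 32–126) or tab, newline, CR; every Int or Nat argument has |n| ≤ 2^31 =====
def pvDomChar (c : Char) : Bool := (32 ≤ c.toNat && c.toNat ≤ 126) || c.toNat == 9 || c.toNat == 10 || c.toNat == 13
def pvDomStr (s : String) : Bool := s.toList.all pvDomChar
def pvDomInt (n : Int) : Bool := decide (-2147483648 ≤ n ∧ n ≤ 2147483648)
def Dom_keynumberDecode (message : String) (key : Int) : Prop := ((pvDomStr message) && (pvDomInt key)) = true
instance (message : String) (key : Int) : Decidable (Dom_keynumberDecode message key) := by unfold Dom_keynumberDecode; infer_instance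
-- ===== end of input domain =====

-- B replaces A's two loops (one building an index→digit dict, one consuming it by index)
-- with a single fused pass carrying the cycling key offset inline (objective: simpler).

-- ===== PORT A =====
-- specials = ["#", "?", "$", "!", "&", "%"]
def kdSpecials : List Char := ['#', '?', '$', '!', '&', '%']

-- first while loop: build 'assignment' (index → keystring char; specials get the int 0,
-- modelled as 'none' since that entry is never read back by the second loop)
def kdBuild : List Char → List Char → Int → Nat → PySem.Dict Int (Option Char) → PySem.Dict Int (Option Char)
  | [], _, _, _, d => d
  | c :: rest, ks, i, off, d =>
    if c ∈ kdSpecials then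
      kdBuild rest ks (i + 1) off (d.insert i none)
    else
      let v := (PySem.List.pyGet? ks (off : Int)).getD ' '   -- keystring[offset]; always in range here (0 ≤ off < keysize)
      let off' := off + 1
      let off'' := if off' > ks.length - 1 then 0 else off'
      kdBuild rest ks (i + 1) off'' (d.insert i (some v))

-- second loop: for letterIndex in range(size), decode via the dict
def kdDecode : List Char → Int → PySem.Dict Int (Option Char) → List Char
  | [], _, _ => []
  | c :: rest, i, d =>
    let newOrd : Int :=
      if c ∉ kdSpecials then
        let a : Char := ((d.get? i).getD none).getD ' '        -- assignment[letterIndex] (always present, a key digit)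
        let digit : Int := (PySem.Int.ofChars? [a]).getD 0     -- int(...); getD-default unreachable inside Pre_
        let n := (c.toNat : Int) - digit
        if n < 65 then n + 26 else n                            -- 65 = ord("A")
      else 32
    Char.ofNat newOrd.toNat :: kdDecode rest (i + 1) d

-- str.capitalize(): first char uppercased, the rest lowercased (exact for the ASCII domain)
def kdCapitalize : List Char → List Char
  | [] => []
  | c :: rest => PySem.Chars.upperChar c :: rest.map PySem.Chars.lowerChar

def keynumberDecode (message : String) (key : Int) : String :=
  let m2 := (PySem.Str.replace (PySem.Str.upper message) " " "").toList
  let ks := PySem.Int.toChars key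
  let assignment := kdBuild m2 ks 0 0 PySem.Dict.empty
  String.ofList (kdCapitalize (kdDecode m2 0 assignment))

-- ===== PORT B =====
-- single fused pass: decode each char as it is met, advancing the key offset modulo keysize
def kdFused : List Char → List Char → Nat → List Char
  | [], _, _ => []
  | c :: rest, ks, off =>
    if c ∈ kdSpecials then
      Char.ofNat 32 :: kdFused rest ks off
    else
      let digit : Int := (PySem.Int.ofChars? [(PySem.List.pyGet? ks (off : Int)).getD ' ']).getD 0
      let v : Int := (c.toNat : Int) - digit
      let v' := if v < 65 then v + 26 else v
      Char.ofNat v'.toNat :: kdFused rest ks ((off + 1) % ks.length)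

def keynumberDecode_alt (message : String) (key : Int) : String :=
  let ks := PySem.Int.toChars key
  String.ofList (kdCapitalize (kdFused (PySem.Str.replace (PySem.Str.upper message) " " "").toList ks 0))

-- ===== PRECONDITION & SPEC =====
-- Pre_ excludes exactly the inputs where the Python A raises ValueError: a negative key
-- (str(key) starts with '-', so int('-') is reached) together with a message containing
-- at least one character that is neither a space nor a special.
def Pre_keynumberDecode (message : String) (key : Int) : Prop :=
  0 ≤ key ∨ ∀ c ∈ message.toList, c = ' ' ∨ c ∈ kdSpecials
instance (message : String) (key : Int) : Decidable (Pre_keynumberDecode message key) := by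
  unfold Pre_keynumberDecode; infer_instance

def pvWitness_keynumberDecode : String × Int := ("KHOOR ZRUOG", 33333)

def Spec_keynumberDecode (message : String) (key : Int) (out : String) : Prop := out = keynumberDecode_alt message key
instance (message : String) (key : Int) (out : String) : Decidable (Spec_keynumberDecode message key out) := by unfold Spec_keynumberDecode; infer_instance

-- ===== CLAIM (what is proved, stated in full; the proofs are below) =====
def Claim_equal_keynumberDecode : Prop := ∀ (message : String) (key : Int), Dom_keynumberDecode message key → Pre_keynumberDecode message key → Spec_keynumberDecode message key (keynumberDecode message key)

-- ===== LEMMAS AND PROOFS =====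

-- kdBuild only inserts keys ≥ i, so lookups of smaller keys see the incoming dict
lemma kdBuild_get_lt (l ks : List Char) (i : Int) (off : Nat) (d : PySem.Dict Int (Option Char))
    (j : Int) (hj : j < i) :
    (kdBuild l ks i off d).get? j = d.get? j := by
  induction l generalizing i off d hj with
  | nil => rfl
  | cons c rest ih =>
    simp only [kdBuild]
    split
    · rw [ih (i + 1) off _ (by omega), PySem.Dict.get?_insert]
      simp [show ¬ j = i from by omega]
    · rw [ih (i + 1) _ _ (by omega), PySem.Dict.get?_insert]
      simp [show ¬ j = i from by omega]

lemma kdWrap_eq_mod (len off : Nat) (h0 : 0 < len) (hoff : off < len) :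
    (if off + 1 > len - 1 then 0 else off + 1) = (off + 1) % len := by
  by_cases h : off + 1 > len - 1
  · have he : off + 1 = len := by omega
    simp [he, Nat.mod_self]
  · have hl : off + 1 < len := by omega
    simp [h, Nat.mod_eq_of_lt hl]

-- build-then-decode equals the fused single pass
lemma kdDecode_kdBuild (l ks : List Char) (i : Int) (off : Nat) (d : PySem.Dict Int (Option Char))
    (h0 : 0 < ks.length) (hoff : off < ks.length) :
    kdDecode l i (kdBuild l ks i off d) = kdFused l ks off := by
  induction l generalizing i off d with
  | nil => rfl
  | cons c rest ih =>
    by_cases hc : c ∈ kdSpecials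
    · simp only [kdBuild, kdDecode, kdFused, hc, if_pos, not_true_eq_false, if_false]
      rw [ih (i + 1) off (d.insert i none) hoff]
      rfl
    · simp only [kdBuild, kdDecode, kdFused, hc, if_neg, not_false_eq_true, if_true]
      have hget : (kdBuild rest ks (i + 1)
            (if off + 1 > ks.length - 1 then 0 else off + 1)
            (d.insert i (some ((PySem.List.pyGet? ks (off : Int)).getD ' ')))).get? i
          = some (some ((PySem.List.pyGet? ks (off : Int)).getD ' ')) := by
        rw [kdBuild_get_lt _ _ _ _ _ _ (by omega), PySem.Dict.get?_insert_self]
      rw [hget]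
      simp only [Option.getD_some]
      rw [kdWrap_eq_mod ks.length off h0 hoff,
        ih (i + 1) ((off + 1) % ks.length) _ (Nat.mod_lt _ h0)]

lemma kdToChars_len_pos (n : Int) : 0 < (PySem.Int.toChars n).length := by
  unfold PySem.Int.toChars
  split
  · simp
  · exact Nat.length_toDigits_pos

-- ===== VERDICT (by name: the statement is the Claim_ definition above) =====
theorem keynumberDecode_spec : Claim_equal_keynumberDecode := by
  intro message key _ _
  unfold Spec_keynumberDecode keynumberDecode keynumberDecode_alt
  exact congrArg (fun l => String.ofList (kdCapitalize l))
    (kdDecode_kdBuild _ _ 0 0 _ (kdToChars_len_pos key) (kdToChars_len_pos key))
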